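-- pv_equiv track=rewrite | github.com/Imperial-MIND-lab/graphTRIP | utils/helpers.py | sort_features
-- ===== SOURCE A (Python) =====
-- def get_groups(features):
--     node_feature_corrs = ['x5-HT1A_corr_x5-HT2A', 'x5-HT1A_corr_x5-HTT', 'x5-HT2A_corr_x5-HTT']
--     groups = [
--         [f for f in features if f.startswith('modularity')],
--         [f for f in features if f.endswith('VIS')],
--         [f for f in features if f.endswith('SMN')],
--         [f for f in features if f.endswith('DAN')],
--         [f for f in features if f.endswith('VAN')],
--         [f for f in features if f.endswith('LIM')],
--         [f for f in features if f.endswith('FPN')],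
--         [f for f in features if f.endswith('DMN')],
--         [f for f in features if f.endswith('D1')],
--         [f for f in features if f.endswith('D2')],
--         [f for f in features if f.endswith('DAT')],
--         [f for f in features if f.endswith('NAT')],
--         [f for f in features if f.endswith('VAChT')],
--         [f for f in features if f.endswith('5-HT1A')],
--         [f for f in features if f.endswith('5-HT1B')],
--         [f for f in features if f.endswith('5-HT2A')],
--         [f for f in features if f.endswith('5-HT4')],
--         [f for f in features if f.endswith('5-HTT')],
--         [f for f in features if f in node_feature_corrs]
--     ]
--     # Sort each group alphabetically
--     for group in groups:
--         group.sort()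
--     return groups
--
-- def sort_features(features):
--     '''Sorts features into groups.'''
--     groups = get_groups(features)
--     sorted_features = []
--     for group in groups:
--         sorted_features.extend(group)
--     # Add un-assigned features at the end
--     unassigned_features = [f for f in features if f not in sorted_features]
--     sorted_features.extend(unassigned_features)
--     return sorted_features
-- ===== SOURCE B (Python) =====
-- def sort_features(features):
--     '''Sorts features into groups.'''
--     node_feature_corrs = ['x5-HT1A_corr_x5-HT2A', 'x5-HT1A_corr_x5-HTT', 'x5-HT2A_corr_x5-HTT']
--     suffixes = ['VIS', 'SMN', 'DAN', 'VAN', 'LIM', 'FPN', 'DMN', 'D1', 'D2',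
--                 'DAT', 'NAT', 'VAChT', '5-HT1A', '5-HT1B', '5-HT2A', '5-HT4', '5-HTT']
--     preds = ([lambda f: f.startswith('modularity')]
--              + [(lambda s: (lambda f: f.endswith(s)))(s) for s in suffixes]
--              + [lambda f: f in node_feature_corrs])
--     groups = [[] for _ in preds]
--     unassigned = []
--     for f in features:
--         if any(p(f) for p in preds):
--             for i, p in enumerate(preds):
--                 if p(f):
--                     groups[i].append(f)
--         else:
--             unassigned.append(f)
--     out = []
--     for g in groups:
--         out.extend(sorted(g))
--     out.extend(unassigned)
--     return out
-- ===== Notes on version B (the rewrite author's own statement) =====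
-- stated objective: alternative
-- what changed: A rescans the whole feature list 19 times (one comprehension per category) and then filters unassigned features by membership in the concatenated result; B makes one dispatch pass over an ordered predicate table, appending each feature to every matching bucket or to an unassigned list if none match, then sorts each bucket and concatenates.
import Mathlib
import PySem

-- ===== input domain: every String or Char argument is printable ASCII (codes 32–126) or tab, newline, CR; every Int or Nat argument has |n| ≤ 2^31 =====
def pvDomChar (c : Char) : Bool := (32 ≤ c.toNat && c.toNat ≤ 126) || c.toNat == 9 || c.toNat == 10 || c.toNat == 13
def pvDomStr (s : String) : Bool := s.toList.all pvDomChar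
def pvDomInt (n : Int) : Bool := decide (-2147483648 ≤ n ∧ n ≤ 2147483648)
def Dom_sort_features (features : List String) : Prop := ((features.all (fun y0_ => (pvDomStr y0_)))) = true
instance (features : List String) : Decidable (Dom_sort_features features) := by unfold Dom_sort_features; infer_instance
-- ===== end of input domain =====

-- B replaces A's 19 separate rescans of the feature list plus its membership pass over the
-- concatenation by one dispatch pass over a predicate table (objective: alternative; return value only).

-- ===== PORT A =====
def pvCorrs : List String :=
  ["x5-HT1A_corr_x5-HT2A", "x5-HT1A_corr_x5-HTT", "x5-HT2A_corr_x5-HTT"]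

def get_groups (features : List String) : List (List String) :=
  let groups : List (List String) :=
    [ features.filter (fun f => PySem.Str.startswith f "modularity"),
      features.filter (fun f => PySem.Str.endswith f "VIS"),
      features.filter (fun f => PySem.Str.endswith f "SMN"),
      features.filter (fun f => PySem.Str.endswith f "DAN"),
      features.filter (fun f => PySem.Str.endswith f "VAN"),
      features.filter (fun f => PySem.Str.endswith f "LIM"),
      features.filter (fun f => PySem.Str.endswith f "FPN"),
      features.filter (fun f => PySem.Str.endswith f "DMN"),
      features.filter (fun f => PySem.Str.endswith f "D1"),
      features.filter (fun f => PySem.Str.endswith f "D2"),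
      features.filter (fun f => PySem.Str.endswith f "DAT"),
      features.filter (fun f => PySem.Str.endswith f "NAT"),
      features.filter (fun f => PySem.Str.endswith f "VAChT"),
      features.filter (fun f => PySem.Str.endswith f "5-HT1A"),
      features.filter (fun f => PySem.Str.endswith f "5-HT1B"),
      features.filter (fun f => PySem.Str.endswith f "5-HT2A"),
      features.filter (fun f => PySem.Str.endswith f "5-HT4"),
      features.filter (fun f => PySem.Str.endswith f "5-HTT"),
      features.filter (fun f => pvCorrs.contains f) ]
  -- for group in groups: group.sort()
  groups.map (fun g => PySem.List.sorted g (fun x => x) false)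

def sort_features (features : List String) : List String :=
  let groups := get_groups features
  let sorted_features := groups.foldl (fun acc g => acc ++ g) []
  let unassigned := features.filter (fun f => !(sorted_features.contains f))
  sorted_features ++ unassigned

-- ===== PORT B =====
def pvPreds : List (String → Bool) :=
  [ fun f => PySem.Str.startswith f "modularity" ] ++
  (["VIS", "SMN", "DAN", "VAN", "LIM", "FPN", "DMN", "D1", "D2",
    "DAT", "NAT", "VAChT", "5-HT1A", "5-HT1B", "5-HT2A", "5-HT4", "5-HTT"].map
      (fun s => (fun f => PySem.Str.endswith f s))) ++
  [ fun f => pvCorrs.contains f ]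

def sort_features_alt (features : List String) : List String :=
  let st :=
    features.foldl
      (fun (st : List (List String) × List String) f =>
        if pvPreds.any (fun p => p f) then
          (List.zipWith (fun p g => if p f then g ++ [f] else g) pvPreds st.1, st.2)
        else
          (st.1, st.2 ++ [f]))
      (pvPreds.map (fun _ => []), [])
  let out := st.1.foldl (fun acc g => acc ++ PySem.List.sorted g (fun x => x) false) []
  out ++ st.2

-- ===== PRECONDITION & SPEC =====
def Spec_sort_features (features : List String) (out : List String) : Prop := out = sort_features_alt features
instance (features : List String) (out : List String) : Decidable (Spec_sort_features features out) := by unfold Spec_sort_features; infer_instance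

-- ===== CLAIM (what is proved, stated in full; the proofs are below) =====
def Claim_equal_sort_features : Prop := ∀ (features : List String), Dom_sort_features features → Spec_sort_features features (sort_features features)

-- ===== LEMMAS AND PROOFS =====

-- A's group list is the per-predicate filter of B's predicate table, sorted (definitional).
theorem pv_groups_eq (features : List String) :
    get_groups features
    = pvPreds.map (fun p => PySem.List.sorted (features.filter p) (fun x => x) false) := rfl

theorem pv_zip_step (f : String) (fs : List String) :
    ∀ (ps : List (String → Bool)) (gs : List (List String)),
    List.zipWith (fun p g => g ++ fs.filter p) ps
      (List.zipWith (fun p g => if p f then g ++ [f] else g) ps gs)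
    = List.zipWith (fun p g => g ++ (f :: fs).filter p) ps gs := by
  intro ps
  induction ps with
  | nil => intro gs; simp
  | cons p ps ih =>
    intro gs
    cases gs with
    | nil => simp
    | cons g gs =>
      simp only [List.zipWith, ih]
      by_cases h : p f
      · simp [List.filter, h]
      · simp [List.filter, h]

theorem pv_zip_nochange (f : String) (fs : List String) :
    ∀ (ps : List (String → Bool)) (gs : List (List String)),
    ps.any (fun p => p f) = false →
    List.zipWith (fun p g => g ++ (f :: fs).filter p) ps gs
    = List.zipWith (fun p g => g ++ fs.filter p) ps gs := by
  intro ps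
  induction ps with
  | nil => intro gs _; simp
  | cons p ps ih =>
    intro gs h
    simp only [List.any_cons, Bool.or_eq_false_iff] at h
    cases gs with
    | nil => simp
    | cons g gs =>
      simp only [List.zipWith]
      rw [ih gs h.2, show List.filter p (f :: fs) = List.filter p fs from by
        simp [List.filter, h.1]]

theorem pv_zip_id (ps : List (String → Bool)) :
    ∀ (gs : List (List String)), gs.length = ps.length →
    List.zipWith (fun (_ : String → Bool) (g : List String) => g) ps gs = gs := by
  induction ps with
  | nil => intro gs h; simp at h; simp [h]
  | cons p ps ih =>
    intro gs h
    cases gs with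
    | nil => simp at h
    | cons g gs =>
      simp only [List.zipWith]
      rw [ih gs (by simpa using h)]

-- The dispatch fold's invariant: groups accumulate the per-predicate filters, unassigned the no-match filter.
theorem pv_fold_invariant (fs : List String) :
    ∀ (gs : List (List String)) (u : List String), gs.length = pvPreds.length →
    fs.foldl
      (fun (st : List (List String) × List String) f =>
        if pvPreds.any (fun p => p f) then
          (List.zipWith (fun p g => if p f then g ++ [f] else g) pvPreds st.1, st.2)
        else
          (st.1, st.2 ++ [f]))
      (gs, u)
    = (List.zipWith (fun p g => g ++ fs.filter p) pvPreds gs,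
       u ++ fs.filter (fun f => !pvPreds.any (fun p => p f))) := by
  induction fs with
  | nil =>
    intro gs u h
    simp only [List.foldl_nil, List.filter_nil, List.append_nil]
    rw [pv_zip_id pvPreds gs h]
  | cons f fs ih =>
    intro gs u h
    by_cases hf : pvPreds.any (fun p => p f)
    · have hlen : (List.zipWith (fun p g => if p f then g ++ [f] else g) pvPreds gs).length
          = pvPreds.length := by
        simp [List.length_zipWith, h]
      simp only [List.foldl_cons, hf, if_true, ih _ u hlen, pv_zip_step]
      simp [List.filter, hf]
    · simp only [Bool.not_eq_true] at hf
      simp only [List.foldl_cons, hf, Bool.false_eq_true, if_false, ih _ _ h]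
      rw [pv_zip_nochange f fs pvPreds gs hf]
      simp [List.filter, hf]

theorem pv_zip_map_nil (fs : List String) :
    ∀ (ps : List (String → Bool)),
    List.zipWith (fun p g => g ++ fs.filter p) ps (ps.map (fun _ => ([] : List String)))
    = ps.map (fun p => fs.filter p) := by
  intro ps
  induction ps with
  | nil => simp
  | cons p ps ih => simp only [List.map, List.zipWith, ih, List.nil_append]

-- membership in the concatenation of sorted per-predicate filters ↔ some predicate fires
theorem pv_contains_concat (features : List String) (f : String) (hf : f ∈ features) :
    ∀ (ps : List (String → Bool)),
    ((ps.map (fun p => PySem.List.sorted (features.filter p) (fun x => x) false)).flatten).contains f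
    = ps.any (fun p => p f) := by
  intro ps
  induction ps with
  | nil => simp
  | cons p ps ih =>
    simp only [List.map_cons, List.flatten_cons, List.contains_eq_mem, List.mem_append,
      PySem.List.mem_sorted, List.mem_filter, List.any_cons] at *
    rw [← ih]
    simp [hf]

theorem pv_main (features : List String) :
    sort_features features = sort_features_alt features := by
  unfold sort_features sort_features_alt
  simp only [pv_fold_invariant features (pvPreds.map (fun _ => [])) [] (by simp),
    pv_zip_map_nil, List.nil_append, pv_groups_eq,
    PySem.List.foldl_append_eq_flatten, PySem.List.foldl_append_eq_flatMap]
  have hflat : (pvPreds.map (fun p => features.filter p)).flatMap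
        (fun g => PySem.List.sorted g (fun x => x) false)
      = (pvPreds.map (fun p =>
          PySem.List.sorted (features.filter p) (fun x => x) false)).flatten := by
    rw [List.flatMap_def, List.map_map]
    rfl
  rw [hflat]
  congr 1
  apply List.filter_congr
  intro f hf
  rw [pv_contains_concat features f hf pvPreds]

-- ===== VERDICT (by name: the statement is the Claim_ definition above) =====
theorem sort_features_spec : Claim_equal_sort_features := by
  intro features _
  unfold Spec_sort_features
  exact pv_main features
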